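-- pv_equiv track=rewrite | github.com/ArshanKhanifar/eopi_solutions | src/vlad/problem_16_p_1_vlad.py | try_it_all
-- ===== SOURCE A (Python) =====
-- def try_it_all(final_score, play_scores):
--     score_combinations = set()
--
--     # first find min val from all play scores
--     min_play_score = min(play_scores)
--
--     # now get the amount or more than needed of the min score to make final
--     min_play_score_needed = final_score // min_play_score
--
--     # this is how much of each score to use at any point
--     play_score_count = [0] * len(play_scores)
--     play_score_count_hlpr = [0] * len(play_scores)
--     while play_score_count[len(play_scores) - 1] < min_play_score_needed:
--         play_score_count_hlpr[0] += 1
--         score_sum = 0   # this is the sum of all scores using the count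
--         for i in range(len(play_score_count)):
--             if i:   # exclude first element since there is none before it
--                 play_score_count_hlpr[i] = play_score_count_hlpr[i-1] // \
--                                            (min_play_score_needed + 1)
--             play_score_count[i] = play_score_count_hlpr[i] % \
--                                   (min_play_score_needed + 1)
--             score_sum += play_score_count[i] * play_scores[i]
--         if score_sum == final_score:
--             score_combinations.add(tuple(play_score_count))
--     return score_combinations
-- ===== SOURCE B (Python) =====
-- def try_it_all(final_score, play_scores):
--     # Pruned backtracking over remaining target, choosing the count for the
--     # last score first so combinations come out in the same order A finds them.
--     results = []
--     counts = [0] * len(play_scores)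
--
--     def rec(j, remaining):
--         if j < 0:
--             if remaining == 0:
--                 results.append(tuple(counts))
--             return
--         s = play_scores[j]
--         for c in range(remaining // s + 1):
--             counts[j] = c
--             rec(j - 1, remaining - c * s)
--         counts[j] = 0
--
--     rec(len(play_scores) - 1, final_score)
--     return set(results)
-- ===== Notes on version B (the rewrite author's own statement) =====
-- stated objective: alternative
-- what changed: A enumerates every count vector in {0..final//min}^n with a base-(needed+1) odometer and tests each sum; B does pruned backtracking on the remaining target, choosing the count for the last score first so the solutions appear in exactly A's order.
-- intended difference: On final_score = 0 (with a non-empty, zero-free play_scores list) A returns no combination while B returns the all-zero count vector, which does reach a final score of 0 and is the intended answer. — e.g. on try_it_all(0, [2, 3]): A returns [], B returns [[0, 0]]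
-- outside the precondition, e.g. on try_it_all(-4, [-2, 3]): A returns {(2, 0)}, B returns set(); on try_it_all(-5, [3, -2]): A returns set(), B returns set()
import Mathlib
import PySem

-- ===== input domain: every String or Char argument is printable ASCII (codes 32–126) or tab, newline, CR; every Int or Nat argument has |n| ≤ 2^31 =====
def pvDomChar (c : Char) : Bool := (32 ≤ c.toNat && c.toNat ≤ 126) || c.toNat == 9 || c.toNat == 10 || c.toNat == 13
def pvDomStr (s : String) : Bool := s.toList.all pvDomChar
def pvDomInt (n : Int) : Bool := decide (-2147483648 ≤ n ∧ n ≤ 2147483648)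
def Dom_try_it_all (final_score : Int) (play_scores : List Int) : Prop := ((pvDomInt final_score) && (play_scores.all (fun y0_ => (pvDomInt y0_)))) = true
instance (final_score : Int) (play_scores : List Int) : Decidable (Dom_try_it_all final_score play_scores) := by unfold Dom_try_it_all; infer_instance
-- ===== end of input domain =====

-- B replaces A's exhaustive base-(needed+1) odometer over all count vectors by pruned
-- backtracking on the remaining target (objective: alternative); on final_score = 0
-- A returns no combination while B returns the all-zero one (see D_try_it_all).

-- ===== PORT A =====
-- body of A's inner 'for i in range(len(play_score_count))' loop; all list reads are
-- in range (indices 0 ≤ i < len), so List.getD reads the same element Python does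
def tryInner (play_scores : List Int) (b : Int)
    (st : List Int × List Int × Int) (i : Nat) : List Int × List Int × Int :=
  match st with
  | (hlpr, count, ssum) =>
    let hlpr := if i = 0 then hlpr else hlpr.set i (PySem.Int.floordiv (hlpr.getD (i-1) 0) b)
    let count := count.set i (PySem.Int.mod (hlpr.getD i 0) b)
    (hlpr, count, ssum + count.getD i 0 * play_scores.getD i 0)

-- A's 'while play_score_count[-1] < min_play_score_needed' loop, made total by fuel
def tryWhile (play_scores : List Int) (final_score needed : Int) :
    Nat → List (List Int) → List Int → List Int → List (List Int)
  | 0, combos, _, _ => combos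
  | fuel+1, combos, count, hlpr =>
    if count.getD (play_scores.length - 1) 0 < needed then
      let hlpr1 := hlpr.set 0 (hlpr.getD 0 0 + 1)
      let st := (List.range play_scores.length).foldl (tryInner play_scores (needed + 1)) (hlpr1, count, 0)
      let combos1 := if st.2.2 = final_score then PySem.Set.add combos st.2.1 else combos
      tryWhile play_scores final_score needed fuel combos1 st.2.1 st.1
    else combos

def try_it_all (final_score : Int) (play_scores : List Int) : List (List Int) :=
  match PySem.List.min? play_scores (fun x => x) with
  | none => []   -- min([]) raises ValueError; excluded by Pre_try_it_all
  | some m =>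
    let needed := PySem.Int.floordiv final_score m
    let n := play_scores.length
    -- fuel: one unit more than the number of iterations the loop performs
    -- (the proof shows it stops at t = needed·(needed+1)^(n-1))
    tryWhile play_scores final_score needed
      (needed.toNat * (needed.toNat + 1) ^ (n - 1) + 1)
      [] (List.replicate n 0) (List.replicate n 0)

-- ===== PORT B =====
-- Source B's 'rec(j, remaining)': Lean argument j is Python's j+1 (0 plays Python's j = -1);
-- the 'for c in range(remaining // s + 1)' loop is the foldl
def altRec (play_scores : List Int) : Nat → Int → List Int → List (List Int) → List Int × List (List Int)
  | 0, remaining, counts, results =>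
      (counts, if remaining = 0 then results ++ [counts] else results)
  | j+1, remaining, counts, results =>
      let s := play_scores.getD j 0
      let st := (PySem.List.pyRange 0 (PySem.Int.floordiv remaining s + 1) 1).foldl
          (fun st c => altRec play_scores j (remaining - c * s) (st.1.set j c) st.2)
          (counts, results)
      (st.1.set j 0, st.2)

def try_it_all_alt (final_score : Int) (play_scores : List Int) : List (List Int) :=
  PySem.Set.ofList (altRec play_scores play_scores.length final_score
      (List.replicate play_scores.length 0) []).2

-- ===== PRECONDITION & SPEC =====
-- Pre_ excludes the empty list (min() raises ValueError), a zero minimum score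
-- (ZeroDivisionError), and the remaining lists holding a non-positive score: on those a
-- negative score makes the set of count vectors reaching final_score unbounded and the
-- finite subset A returns (its odometer stops at final_score // min digits) is an
-- accident of its implementation. Non-positive scores stay admitted where the claim is
-- still provable: single-score lists, a zero target over a zero-free list, and the
-- suffix-guarded shapes of the last two clauses, where both programs return the empty
-- set (elsewhere B may reach a zero score and divide by zero, or miss A's accidental set).
def Pre_try_it_all (final_score : Int) (play_scores : List Int) : Prop :=
  play_scores ≠ [] ∧
    ((∀ s ∈ play_scores, 0 < s)
     ∨ (play_scores.length = 1 ∧ play_scores.getD 0 0 ≠ 0)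
     ∨ (final_score = 0 ∧ (0:Int) ∉ play_scores)
     ∨ (0 < final_score ∧ ∃ i < play_scores.length, play_scores.getD i 0 < 0 ∧
          ∀ k < play_scores.length, i < k → final_score < play_scores.getD k 0)
     ∨ (final_score < 0 ∧ (0:Int) ∉ play_scores ∧
          (∀ s ∈ play_scores, s < 0 → final_score > s) ∧
          ∃ i < play_scores.length, 0 < play_scores.getD i 0 ∧
            ∀ k < play_scores.length, i < k → play_scores.getD k 0 < 0))
instance (final_score : Int) (play_scores : List Int) : Decidable (Pre_try_it_all final_score play_scores) := by unfold Pre_try_it_all; infer_instance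

def pvWitness_try_it_all : Int × List Int := (6, [2, 3])

-- When final_score = 0 (zero-free scores), A returns no combination but B returns the
-- all-zero count vector, which does reach a final score of 0 and is the intended answer.
def D_try_it_all (final_score : Int) (play_scores : List Int) : Prop := final_score = 0
instance (final_score : Int) (play_scores : List Int) : Decidable (D_try_it_all final_score play_scores) := by unfold D_try_it_all; infer_instance

def Spec_try_it_all (final_score : Int) (play_scores : List Int) (out : List (List Int)) : Prop := ¬ D_try_it_all final_score play_scores → out = try_it_all_alt final_score play_scores
instance (final_score : Int) (play_scores : List Int) (out : List (List Int)) : Decidable (Spec_try_it_all final_score play_scores out) := by unfold Spec_try_it_all; infer_instance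

def pvDiffWitness_try_it_all : Int × List Int := (0, [2, 3])
def pvDiffWitnessOut_try_it_all : (List (List Int)) × (List (List Int)) := ([], [[0, 0]])

-- ===== CLAIM (what is proved, stated in full; the proofs are below) =====
def Claim_unchanged_try_it_all : Prop := ∀ (final_score : Int) (play_scores : List Int), Dom_try_it_all final_score play_scores → Pre_try_it_all final_score play_scores → Spec_try_it_all final_score play_scores (try_it_all final_score play_scores)
def Claim_changed_try_it_all : Prop := Dom_try_it_all (pvDiffWitness_try_it_all.1) (pvDiffWitness_try_it_all.2) ∧ Pre_try_it_all (pvDiffWitness_try_it_all.1) (pvDiffWitness_try_it_all.2) ∧ D_try_it_all (pvDiffWitness_try_it_all.1) (pvDiffWitness_try_it_all.2) ∧ try_it_all (pvDiffWitness_try_it_all.1) (pvDiffWitness_try_it_all.2) = pvDiffWitnessOut_try_it_all.1 ∧ try_it_all_alt (pvDiffWitness_try_it_all.1) (pvDiffWitness_try_it_all.2) = pvDiffWitnessOut_try_it_all.2 ∧ pvDiffWitnessOut_try_it_all.1 ≠ pvDiffWitnessOut_try_it_all.2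
def Claim_exact_try_it_all : Prop := ∀ (final_score : Int) (play_scores : List Int), Dom_try_it_all final_score play_scores → Pre_try_it_all final_score play_scores → D_try_it_all final_score play_scores → try_it_all final_score play_scores ≠ try_it_all_alt final_score play_scores

-- ===== LEMMAS AND PROOFS =====

-- proof-side views of the two programs
def dotp (v ps : List Int) : Int := (List.zipWith (· * ·) v ps).sum

def valb (b : Int) : List Int → Int
  | [] => 0
  | d :: v => d + b * valb b v

def digv (b : Int) (n : Nat) (t : Int) : List Int :=
  (List.range n).map (fun i => t / b ^ i % b)

def hlprv (b : Int) (n : Nat) (t : Int) : List Int :=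
  (List.range n).map (fun i => t / b ^ i)

def emit (ps : List Int) : Nat → Int → List (List Int)
  | 0, r => if r = 0 then [[]] else []
  | j+1, r => (PySem.List.pyRange 0 (r / ps.getD j 0 + 1) 1).flatMap
      (fun c => (emit ps j (r - c * ps.getD j 0)).map (fun v => v ++ [c]))

-- generic list helpers
theorem set_map_range {α : Type} (f : Nat → α) (n k : Nat) (x : α) (hk : k < n) :
    ((List.range n).map f).set k x = (List.range n).map (fun i => if i = k then x else f i) := by
  apply List.ext_getElem
  · simp
  · intro i h1 h2
    simp only [List.getElem_set, List.getElem_map, List.getElem_range]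
    by_cases h : i = k <;> simp [h, Ne.symm]

theorem set_replicate_append (j : Nat) (x c : Int) (tail : List Int) :
    (List.replicate j (0:Int) ++ x :: tail).set j c = List.replicate j 0 ++ c :: tail := by
  induction j with
  | zero => simp
  | succ j ih => simp [List.replicate_succ, ih]

-- dotp facts
theorem zipWith_mul_nonneg (v ps : List Int) (hv : ∀ x ∈ v, 0 ≤ x) (hps : ∀ s ∈ ps, 0 ≤ s) :
    ∀ y ∈ List.zipWith (· * ·) v ps, 0 ≤ y := by
  induction v generalizing ps with
  | nil => simp
  | cons d v ih =>
    cases ps with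
    | nil => simp
    | cons s ps =>
      intro y hy
      simp only [List.zipWith_cons_cons, List.mem_cons] at hy
      rcases hy with h | h
      · subst h
        exact mul_nonneg (hv _ (by simp)) (hps _ (by simp))
      · exact ih ps (fun x hx => hv x (List.mem_cons_of_mem _ hx)) (fun x hx => hps x (List.mem_cons_of_mem _ hx)) y h

theorem dotp_nonneg (v ps : List Int) (hv : ∀ x ∈ v, 0 ≤ x) (hps : ∀ s ∈ ps, 0 ≤ s) :
    0 ≤ dotp v ps := by
  unfold dotp
  apply List.sum_nonneg
  exact zipWith_mul_nonneg v ps hv hps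

theorem dotp_zero_of (v ps : List Int) (hv : ∀ x ∈ v, x = 0) : dotp v ps = 0 := by
  unfold dotp
  apply List.sum_eq_zero
  intro y hy
  induction v generalizing ps with
  | nil => simp at hy
  | cons d v ih =>
    cases ps with
    | nil => simp at hy
    | cons s ps =>
      simp only [List.zipWith_cons_cons, List.mem_cons] at hy
      rcases hy with h | h
      · subst h; rw [hv d (by simp)]; ring
      · exact ih ps (fun x hx => hv x (List.mem_cons_of_mem _ hx)) h

theorem dotp_map_range (ps : List Int) (g : Nat → Int) :
    dotp ((List.range ps.length).map g) ps
      = ((List.range ps.length).map (fun i => g i * ps.getD i 0)).sum := by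
  unfold dotp
  congr 1
  apply List.ext_getElem
  · simp
  · intro i h1 h2
    simp only [List.getElem_zipWith, List.getElem_map, List.getElem_range]
    rw [List.getD_eq_getElem ps 0 (by simpa using h2)]

theorem zipWith_take_right (f : Int → Int → Int) (v : List Int) :
    ∀ (ps : List Int) (j : Nat), v.length ≤ j → List.zipWith f v (ps.take j) = List.zipWith f v ps := by
  induction v with
  | nil => simp
  | cons d v ih =>
    intro ps j hle
    cases ps with
    | nil => simp
    | cons s ps =>
      cases j with
      | zero => simp at hle
      | succ j => simp [ih ps j (by simpa using hle)]

theorem dotp_snoc_getD (w ps : List Int) (c : Int) (j : Nat) (hw : w.length = j)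
    (hj : j < ps.length) : dotp (w ++ [c]) ps = dotp w ps + c * ps[j] := by
  have hsplit : ps = ps.take j ++ ps[j] :: ps.drop (j+1) := by
    conv_lhs => rw [← List.take_append_drop j ps]
    rw [List.drop_eq_getElem_cons hj]
  have h2 : List.zipWith (· * ·) (w ++ [c]) ps = List.zipWith (· * ·) w ps ++ [c * ps[j]] := by
    conv_lhs => rw [hsplit]
    rw [List.zipWith_append (by simp [hw, hj.le])]
    rw [zipWith_take_right _ w ps j (le_of_eq hw)]
    simp only [List.zipWith_cons_cons, List.zipWith_nil_left]
  unfold dotp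
  rw [h2, List.sum_append]
  simp

theorem single_le_dotp (v ps : List Int) (hlen : v.length ≤ ps.length)
    (hv : ∀ x ∈ v, 0 ≤ x) (hps : ∀ s ∈ ps, 0 ≤ s) (k : Nat) (hk : k < v.length) :
    v[k] * ps[k]'(by omega) ≤ dotp v ps := by
  have hmem : v[k] * ps[k]'(by omega) ∈ List.zipWith (· * ·) v ps := by
    have hkz : k < (List.zipWith (· * ·) v ps).length := by simp; omega
    have : (List.zipWith (· * ·) v ps)[k] = v[k] * ps[k]'(by omega) := List.getElem_zipWith
    rw [← this]
    exact List.getElem_mem hkz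
  exact List.single_le_sum (zipWith_mul_nonneg v ps hv hps) _ hmem

-- valb facts
theorem valb_nonneg (b : Int) (v : List Int) (hv : ∀ x ∈ v, 0 ≤ x) (hb : 0 ≤ b) :
    0 ≤ valb b v := by
  induction v with
  | nil => simp [valb]
  | cons d v ih =>
    have h1 := hv d (by simp)
    have h2 := ih (fun x hx => hv x (List.mem_cons_of_mem _ hx))
    simp only [valb]
    nlinarith

theorem valb_lt_pow (b : Int) (v : List Int) (hb : 0 < b) (hv : ∀ x ∈ v, 0 ≤ x ∧ x < b) :
    valb b v < b ^ v.length := by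
  induction v with
  | nil => simp [valb]
  | cons d v ih =>
    have h1 := hv d (by simp)
    have h2 := ih (fun x hx => hv x (List.mem_cons_of_mem _ hx))
    have h3 : 0 ≤ valb b v := valb_nonneg b v (fun x hx => (hv x (List.mem_cons_of_mem _ hx)).1) hb.le
    simp only [valb, List.length_cons, pow_succ]
    have hp : (0:Int) < b ^ v.length := pow_pos hb _
    nlinarith

theorem valb_snoc (b d : Int) (w : List Int) :
    valb b (w ++ [d]) = valb b w + d * b ^ w.length := by
  induction w with
  | nil => simp [valb]
  | cons e w ih =>
    simp only [List.cons_append, valb, ih, List.length_cons, pow_succ]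
    ring

theorem valb_eq_zero (b : Int) (v : List Int) (hb : 0 < b) (hv : ∀ x ∈ v, 0 ≤ x)
    (h : valb b v = 0) : ∀ x ∈ v, x = 0 := by
  induction v with
  | nil => simp
  | cons d v ih =>
    have h1 := hv d (by simp)
    have h2 : 0 ≤ valb b v := valb_nonneg b v (fun x hx => hv x (List.mem_cons_of_mem _ hx)) hb.le
    simp only [valb] at h
    have hd : d = 0 ∧ valb b v = 0 := by constructor <;> nlinarith
    intro x hx
    rcases List.mem_cons.mp hx with h | h
    · omega
    · exact ih (fun x hx => hv x (List.mem_cons_of_mem _ hx)) hd.2 x h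

theorem valb_zero_of (b : Int) (v : List Int) (hv : ∀ x ∈ v, x = 0) : valb b v = 0 := by
  induction v with
  | nil => simp [valb]
  | cons d v ih =>
    simp only [valb, hv d (by simp), ih (fun x hx => hv x (List.mem_cons_of_mem _ hx))]
    ring

-- digv facts
theorem digv_zero (b : Int) (n : Nat) : digv b n 0 = List.replicate n 0 := by
  unfold digv
  apply List.eq_replicate_iff.mpr
  constructor
  · simp
  · intro x hx
    simp only [List.mem_map, List.mem_range] at hx
    obtain ⟨i, _, hi⟩ := hx
    simp [← hi]

theorem hlprv_zero (b : Int) (n : Nat) : hlprv b n 0 = List.replicate n 0 := by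
  unfold hlprv
  apply List.eq_replicate_iff.mpr
  constructor
  · simp
  · intro x hx
    simp only [List.mem_map, List.mem_range] at hx
    obtain ⟨i, _, hi⟩ := hx
    simp [← hi]

theorem digv_succ (b : Int) (n : Nat) (t : Int) (hb : 0 < b) :
    digv b (n+1) t = (t % b) :: digv b n (t / b) := by
  unfold digv
  rw [List.range_succ_eq_map]
  simp only [List.map_cons, List.map_map]
  congr 1
  · simp
  · apply List.map_congr_left
    intro i _
    simp only [Function.comp_apply, Nat.succ_eq_add_one]
    rw [pow_succ']
    rw [← Int.ediv_ediv_of_nonneg hb.le]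

theorem valb_digv (b : Int) (hb : 0 < b) : ∀ (n : Nat) (t : Int), 0 ≤ t → t < b ^ n →
    valb b (digv b n t) = t := by
  intro n
  induction n with
  | zero =>
    intro t ht hlt
    simp only [pow_zero] at hlt
    interval_cases t
    simp [digv, valb]
  | succ n ih =>
    intro t ht hlt
    rw [digv_succ b n t hb]
    simp only [valb]
    rw [ih (t / b) (Int.ediv_nonneg ht hb.le) (by
      rw [Int.ediv_lt_iff_lt_mul (by positivity)]
      calc t < b ^ (n+1) := hlt
        _ = b ^ n * b := by ring)]
    exact Int.emod_add_mul_ediv t b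

theorem digv_valb (b : Int) (hb : 0 < b) : ∀ (v : List Int), (∀ x ∈ v, 0 ≤ x ∧ x < b) →
    digv b v.length (valb b v) = v := by
  intro v
  induction v with
  | nil => intro _; simp [digv, valb]
  | cons d v ih =>
    intro hv
    have hd := hv d (by simp)
    have hX : 0 ≤ valb b v := valb_nonneg b v (fun x hx => (hv x (List.mem_cons_of_mem _ hx)).1) hb.le
    simp only [List.length_cons, valb]
    rw [digv_succ b _ _ hb]
    have e1 : (d + b * valb b v) % b = d := by
      rw [Int.add_mul_emod_self_left, Int.emod_eq_of_lt hd.1 hd.2]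
    have e2 : (d + b * valb b v) / b = valb b v := by
      rw [Int.add_mul_ediv_left _ _ (by omega : b ≠ 0), Int.ediv_eq_zero_of_lt hd.1 hd.2]
      omega
    rw [e1, e2, ih (fun x hx => hv x (List.mem_cons_of_mem _ hx))]

theorem digv_length (b : Int) (n : Nat) (t : Int) : (digv b n t).length = n := by
  simp [digv]

theorem digv_entry_nonneg (b : Int) (n : Nat) (t : Int) (hb : 0 < b) :
    ∀ x ∈ digv b n t, 0 ≤ x := by
  intro x hx
  simp only [digv, List.mem_map, List.mem_range] at hx
  obtain ⟨i, _, hi⟩ := hx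
  rw [← hi]
  exact Int.emod_nonneg _ (by omega)

-- divisor monotonicity of floor division
theorem ediv_le_ediv_divisor (f m s : Int) (hf : 0 ≤ f) (hm : 0 < m) (hms : m ≤ s) :
    f / s ≤ f / m := by
  rw [Int.le_ediv_iff_mul_le hm]
  calc f / s * m ≤ f / s * s := by
        apply mul_le_mul_of_nonneg_left hms
        exact Int.ediv_nonneg hf (by omega)
    _ ≤ f := Int.ediv_mul_le f (by omega)

-- emit facts
theorem emit_neg (ps : List Int) (hps : ∀ s ∈ ps, 0 < s) (j : Nat) (hj : j ≤ ps.length)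
    (r : Int) (hr : r < 0) : emit ps j r = [] := by
  cases j with
  | zero => simp only [emit]; rw [if_neg (by omega)]
  | succ j =>
    have hs : 0 < ps.getD j 0 := by
      rw [List.getD_eq_getElem ps 0 (by omega)]
      exact hps _ (List.getElem_mem _)
    have : r / ps.getD j 0 < 0 := Int.ediv_neg_of_neg_of_pos hr hs
    simp only [emit]
    rw [PySem.List.pyRange_one_eq_nil (by omega)]
    simp
theorem emit_mem (ps : List Int) (hps : ∀ s ∈ ps, 0 < s) :
    ∀ (j : Nat), j ≤ ps.length → ∀ (r : Int) (v : List Int),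
      (v ∈ emit ps j r ↔ v.length = j ∧ (∀ x ∈ v, 0 ≤ x) ∧ dotp v ps = r) := by
  intro j
  induction j with
  | zero =>
    intro hj r v
    simp only [emit]
    split
    · next hr =>
      subst hr
      simp only [List.mem_singleton]
      constructor
      · rintro rfl
        exact ⟨rfl, by simp, by simp [dotp]⟩
      · rintro ⟨hl, -, -⟩
        exact List.eq_nil_of_length_eq_zero hl
    · next hr =>
      simp only [List.not_mem_nil, false_iff]
      rintro ⟨hl, -, hd⟩
      have : v = [] := List.eq_nil_of_length_eq_zero hl
      subst this
      simp [dotp] at hd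
      exact hr hd.symm
  | succ j ih =>
    intro hj r v
    have hjlen : j < ps.length := by omega
    have hsval : ps.getD j 0 = ps[j] := List.getD_eq_getElem ps 0 hjlen
    have hs : 0 < ps[j] := hps _ (List.getElem_mem hjlen)
    simp only [emit, List.mem_flatMap, List.mem_map]
    constructor
    · rintro ⟨c, hc, w, hw, rfl⟩
      obtain ⟨hc0, hclt⟩ := (PySem.List.mem_pyRange_one).mp hc
      obtain ⟨hwl, hwn, hwd⟩ := (ih (by omega) _ w).mp hw
      refine ⟨by simp [hwl], ?_, ?_⟩
      · intro x hx
        rcases List.mem_append.mp hx with h | h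
        · exact hwn x h
        · simp only [List.mem_singleton] at h; omega
      · rw [dotp_snoc_getD w ps c j hwl hjlen, hwd, hsval]
        ring
    · rintro ⟨hl, hn, hd⟩
      have hvne : v ≠ [] := by
        intro h; subst h; simp at hl
      obtain ⟨w, c, rfl⟩ : ∃ w c, v = w ++ [c] :=
        ⟨v.dropLast, v.getLast hvne, (List.dropLast_append_getLast hvne).symm⟩
      have hwl : w.length = j := by simpa using hl
      have hcn : 0 ≤ c := hn c (by simp)
      have hwn : ∀ x ∈ w, 0 ≤ x := fun x hx => hn x (by simp [hx])
      have hsnoc := dotp_snoc_getD w ps c j hwl hjlen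
      have hdw : dotp w ps = r - c * ps[j] := by rw [hsnoc] at hd; linarith
      have hwnn : 0 ≤ dotp w ps := dotp_nonneg w ps hwn (fun s hs => (hps s hs).le)
      have hcs : c * ps[j] ≤ r := by linarith
      refine ⟨c, ?_, w, (ih (by omega) _ w).mpr ⟨hwl, hwn, by rw [hdw, hsval]⟩, rfl⟩
      rw [PySem.List.mem_pyRange_one]
      have : c ≤ r / ps[j] := (Int.le_ediv_iff_mul_le hs).mpr hcs
      rw [hsval]
      omega

theorem emit_good (ps : List Int) (m f : Int) (hps : ∀ s ∈ ps, 0 < s)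
    (hmin : ∀ s ∈ ps, m ≤ s) (hm : 0 < m) (hf : 0 ≤ f) :
    ∀ (j : Nat), j ≤ ps.length → ∀ (r : Int), r ≤ f →
      (∀ v ∈ emit ps j r, ∀ x ∈ v, x < f / m + 1) ∧
      (emit ps j r).Pairwise (fun v w => valb (f / m + 1) v < valb (f / m + 1) w) := by
  have hneed : 0 ≤ f / m := Int.ediv_nonneg hf hm.le
  have hb : (0:Int) < f / m + 1 := by omega
  intro j
  induction j with
  | zero =>
    intro hj r hr
    constructor
    · intro v hv x hx
      simp only [emit] at hv
      split at hv <;> simp_all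
    · simp only [emit]
      split <;> simp
  | succ j ih =>
    intro hj r hr
    rcases lt_or_ge r 0 with hneg | hrn
    · rw [emit_neg ps hps _ hj r hneg]
      simp
    · have hjlen : j < ps.length := by omega
      have hsval : ps.getD j 0 = ps[j] := List.getD_eq_getElem ps 0 hjlen
      have hs : 0 < ps[j] := hps _ (List.getElem_mem hjlen)
      have hcbound : ∀ c : Int, c ≤ r / ps[j] → c ≤ f / m := by
        intro c hc
        calc c ≤ r / ps[j] := hc
          _ ≤ f / ps[j] := Int.ediv_le_ediv hs hr
          _ ≤ f / m := ediv_le_ediv_divisor f m ps[j] hf hm (hmin _ (List.getElem_mem hjlen))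
      have hrle : ∀ c : Int, 0 ≤ c → r - c * ps[j] ≤ f := by
        intro c hc
        have : 0 ≤ c * ps[j] := mul_nonneg hc hs.le
        omega
      constructor
      · intro v hv x hx
        simp only [emit, List.mem_flatMap, List.mem_map] at hv
        obtain ⟨c, hc, w, hw, rfl⟩ := hv
        obtain ⟨hc0, hclt⟩ := (PySem.List.mem_pyRange_one).mp hc
        rcases List.mem_append.mp hx with h | h
        · exact ((ih (by omega) _ (by rw [hsval]; exact hrle c hc0)).1) w hw x h
        · simp only [List.mem_singleton] at h
          subst h
          have := hcbound x (by rw [← hsval]; omega)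
          omega
      · simp only [emit]
        rw [List.pairwise_flatMap]
        constructor
        · intro c hc
          rw [List.pairwise_map]
          obtain ⟨hc0, hclt⟩ := (PySem.List.mem_pyRange_one).mp hc
          have hpw := (ih (by omega) (r - c * ps.getD j 0) (by rw [hsval]; exact hrle c hc0)).2
          refine hpw.imp_of_mem ?_
          intro v w hv hw h
          have hvl := ((emit_mem ps hps j (by omega) _ v).mp hv).1
          have hwl := ((emit_mem ps hps j (by omega) _ w).mp hw).1
          rw [valb_snoc, valb_snoc, hvl, hwl]
          linarith
        · have hp := PySem.List.pairwise_lt_pyRange_one (a := 0) (b := r / ps.getD j 0 + 1)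
          apply hp.imp_of_mem
          intro c1 c2 hc1 hc2 hlt x hx y hy
          obtain ⟨hc10, -⟩ := (PySem.List.mem_pyRange_one).mp hc1
          obtain ⟨hc20, hc2lt⟩ := (PySem.List.mem_pyRange_one).mp hc2
          simp only [List.mem_map] at hx hy
          obtain ⟨v1, hv1, rfl⟩ := hx
          obtain ⟨v2, hv2, rfl⟩ := hy
          have hle1 : r - c1 * ps.getD j 0 ≤ f := by rw [hsval]; exact hrle c1 hc10
          have hle2 : r - c2 * ps.getD j 0 ≤ f := by rw [hsval]; exact hrle c2 hc20
          obtain ⟨h1l, h1n, -⟩ := (emit_mem ps hps j (by omega) _ v1).mp hv1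
          obtain ⟨h2l, h2n, -⟩ := (emit_mem ps hps j (by omega) _ v2).mp hv2
          have hv1lt : valb (f / m + 1) v1 < (f / m + 1) ^ j := by
            have := valb_lt_pow (f / m + 1) v1 hb (fun x hx =>
              ⟨h1n x hx, (ih (by omega) _ hle1).1 v1 hv1 x hx⟩)
            rwa [h1l] at this
          have hv2n : 0 ≤ valb (f / m + 1) v2 := valb_nonneg _ v2 h2n hb.le
          rw [valb_snoc, valb_snoc, h1l, h2l]
          have hpow : (0:Int) < (f / m + 1) ^ j := pow_pos hb _
          have hstep : (c1 + 1) * (f / m + 1) ^ j ≤ c2 * (f / m + 1) ^ j :=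
            mul_le_mul_of_nonneg_right (by omega) hpow.le
          nlinarith

-- ===== port A characterized =====
-- hybrid states of the inner loop after processing indices 0..k-1 of iteration t+1
def hybH (b t : Int) (n k : Nat) : List Int :=
  (List.range n).map (fun i => if i < max k 1 then (t+1) / b ^ i else t / b ^ i)

def hybC (b t : Int) (n k : Nat) : List Int :=
  (List.range n).map (fun i => if i < k then (t+1) / b ^ i % b else t / b ^ i % b)

def psum (b t : Int) (ps : List Int) (k : Nat) : Int :=
  ((List.range k).map (fun i => ((t+1) / b ^ i % b) * ps.getD i 0)).sum

theorem tryInner_step (ps : List Int) (b t : Int) (hb : 0 < b) (n k : Nat) (hk : k < n) :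
    tryInner ps b (hybH b t n k, hybC b t n k, psum b t ps k) k
      = (hybH b t n (k+1), hybC b t n (k+1), psum b t ps (k+1)) := by
  have hC1 : ∀ k', k' < n → (hybC b t n (k'+1)).getD k' 0 = (t+1) / b ^ k' % b := by
    intro k' hk'
    unfold hybC
    rw [PySem.List.getD_map_range _ n k' 0 hk']
    simp
  cases k with
  | zero =>
    simp only [tryInner, reduceIte]
    have hget : (hybH b t n 0).getD 0 0 = t + 1 := by
      unfold hybH
      rw [PySem.List.getD_map_range _ n 0 0 hk]
      simp
    have hsetC : (hybC b t n 0).set 0 (PySem.Int.mod ((hybH b t n 0).getD 0 0) b)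
        = hybC b t n 1 := by
      rw [hget, PySem.Int.mod_eq_emod_of_pos hb]
      unfold hybC
      rw [set_map_range _ n 0 _ hk]
      apply List.map_congr_left
      intro i _
      by_cases h : i = 0
      · subst h; simp
      · rw [if_neg h, if_neg (show ¬ i < 0 by omega), if_neg (show ¬ i < 1 by omega)]
    rw [hsetC]
    have hHH : hybH b t n 0 = hybH b t n 1 := rfl
    rw [hHH, hC1 0 hk]
    simp [psum]
  | succ k' =>
    have hk' : k' < n := by omega
    simp only [tryInner, reduceIte]
    rw [if_neg (Nat.succ_ne_zero k')]
    have hgetp : (hybH b t n (k'+1)).getD (k'+1-1) 0 = (t+1) / b ^ k' := by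
      unfold hybH
      simp only [Nat.add_sub_cancel]
      rw [PySem.List.getD_map_range _ n k' 0 hk']
      rw [if_pos (show k' < max (k'+1) 1 by omega)]
    have hsetH : (hybH b t n (k'+1)).set (k'+1)
        (PySem.Int.floordiv ((hybH b t n (k'+1)).getD (k'+1-1) 0) b) = hybH b t n (k'+2) := by
      rw [hgetp, PySem.Int.floordiv_eq_ediv_of_pos hb]
      unfold hybH
      rw [set_map_range _ n (k'+1) _ hk]
      apply List.map_congr_left
      intro i _
      by_cases h : i = k'+1
      · subst h
        rw [if_pos rfl, if_pos (show k'+1 < max (k'+2) 1 by omega),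
          Int.ediv_ediv_of_nonneg (by positivity), ← pow_succ]
      · rw [if_neg h]
        by_cases h2 : i < max (k'+1) 1
        · rw [if_pos h2, if_pos (show i < max (k'+2) 1 by omega)]
        · rw [if_neg h2, if_neg (show ¬ i < max (k'+2) 1 by omega)]
    rw [hsetH]
    have hget2 : (hybH b t n (k'+2)).getD (k'+1) 0 = (t+1) / b ^ (k'+1) := by
      unfold hybH
      rw [PySem.List.getD_map_range _ n (k'+1) 0 hk]
      rw [if_pos (show k'+1 < max (k'+2) 1 by omega)]
    have hsetC : (hybC b t n (k'+1)).set (k'+1)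
        (PySem.Int.mod ((hybH b t n (k'+2)).getD (k'+1) 0) b) = hybC b t n (k'+2) := by
      rw [hget2, PySem.Int.mod_eq_emod_of_pos hb]
      unfold hybC
      rw [set_map_range _ n (k'+1) _ hk]
      apply List.map_congr_left
      intro i _
      by_cases h : i = k'+1
      · subst h; simp
      · rw [if_neg h]
        by_cases h2 : i < k'+1
        · rw [if_pos h2, if_pos (show i < k'+2 by omega)]
        · rw [if_neg h2, if_neg (show ¬ i < k'+2 by omega)]
    rw [hsetC, hC1 (k'+1) hk]
    unfold psum
    rw [List.range_succ (n := k'+1), List.map_append, List.sum_append]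
    simp

theorem inner_fold_aux (ps : List Int) (b t : Int) (hb : 0 < b) (n : Nat) :
    ∀ k, k ≤ n → (List.range k).foldl (tryInner ps b) (hybH b t n 0, hybC b t n 0, 0)
      = (hybH b t n k, hybC b t n k, psum b t ps k) := by
  intro k
  induction k with
  | zero =>
    intro _
    simp [psum]
  | succ k ih =>
    intro hk
    rw [List.range_succ, List.foldl_append, ih (by omega)]
    simp only [List.foldl_cons, List.foldl_nil]
    exact tryInner_step ps b t hb n k (by omega)


theorem inner_fold (ps : List Int) (b t : Int) (hb : 0 < b) (ht : 0 ≤ t)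
    (n : Nat) (hn : n = ps.length) (hn1 : 1 ≤ n) :
    (List.range n).foldl (tryInner ps b) ((hlprv b n t).set 0 (t+1), digv b n t, 0)
      = (hlprv b n (t+1), digv b n (t+1), dotp (digv b n (t+1)) ps) := by
  have h0 : ((hlprv b n t).set 0 (t+1), digv b n t, (0:Int))
      = (hybH b t n 0, hybC b t n 0, (0:Int)) := by
    refine Prod.ext ?_ (Prod.ext ?_ rfl)
    · show (hlprv b n t).set 0 (t+1) = hybH b t n 0
      unfold hlprv hybH
      rw [set_map_range _ n 0 _ (by omega)]
      apply List.map_congr_left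
      intro i _
      by_cases h : i = 0
      · subst h; simp
      · rw [if_neg h, if_neg (by omega)]
    · show digv b n t = hybC b t n 0
      unfold digv hybC
      apply List.map_congr_left
      intro i _
      rw [if_neg (by omega)]
  rw [h0, inner_fold_aux ps b t hb n n le_rfl]
  refine Prod.ext ?_ (Prod.ext ?_ ?_)
  · show hybH b t n n = hlprv b n (t+1)
    unfold hybH hlprv
    apply List.map_congr_left
    intro i hi
    rw [if_pos (by simp at hi; omega)]
  · show hybC b t n n = digv b n (t+1)
    unfold hybC digv
    apply List.map_congr_left
    intro i hi
    rw [if_pos (by simpa using hi)]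
  · show psum b t ps n = dotp (digv b n (t+1)) ps
    unfold psum digv
    rw [hn, dotp_map_range]

theorem loop_char (ps : List Int) (f needed : Int) (n : Nat) (hn : n = ps.length)
    (hn1 : 1 ≤ n) (hneed : 0 ≤ needed) :
    ∀ (fuel : Nat) (t : Int) (combos : List (List Int)), 0 ≤ t →
      t ≤ needed * (needed+1) ^ (n-1) → needed * (needed+1) ^ (n-1) - t < (fuel : Int) →
      tryWhile ps f needed fuel combos (digv (needed+1) n t) (hlprv (needed+1) n t)
        = (PySem.List.pyRange (t+1) (needed * (needed+1) ^ (n-1) + 1) 1).foldl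
            (fun cs u => if dotp (digv (needed+1) n u) ps = f
              then PySem.Set.add cs (digv (needed+1) n u) else cs) combos := by
  subst hn
  have hb : (0:Int) < needed + 1 := by omega
  have hpw : (0:Int) < (needed+1) ^ (ps.length-1) := pow_pos hb _
  intro fuel
  induction fuel with
  | zero =>
    intro t combos ht hT hfuel
    exfalso
    push_cast at hfuel
    omega
  | succ fuel ih =>
    intro t combos ht hT hfuel
    have hgetd : (digv (needed+1) ps.length t).getD (ps.length-1) 0
        = t / (needed+1) ^ (ps.length-1) % (needed+1) := by
      unfold digv
      rw [PySem.List.getD_map_range _ ps.length (ps.length-1) 0 (by omega)]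
    rcases eq_or_lt_of_le hT with heq | hlt
    · -- t = T: the loop stops
      have hdiv : t / (needed+1) ^ (ps.length-1) = needed := by
        rw [heq]
        exact Int.mul_ediv_cancel _ (by omega)
      have hemod : t / (needed+1) ^ (ps.length-1) % (needed+1) = needed := by
        rw [hdiv]
        exact Int.emod_eq_of_lt hneed (by omega)
      simp only [tryWhile, hgetd, hemod]
      rw [if_neg (lt_irrefl needed)]
      rw [heq, PySem.List.pyRange_one_eq_nil (by omega)]
      simp
    · -- t < T: one more iteration
      have hx0 : 0 ≤ t / (needed+1) ^ (ps.length-1) := Int.ediv_nonneg ht hpw.le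
      have hxlt : t / (needed+1) ^ (ps.length-1) < needed := by
        rw [Int.ediv_lt_iff_lt_mul hpw]
        omega
      have hemod : t / (needed+1) ^ (ps.length-1) % (needed+1) = t / (needed+1) ^ (ps.length-1) :=
        Int.emod_eq_of_lt hx0 (by omega)
      simp only [tryWhile, hgetd, hemod]
      rw [if_pos hxlt]
      have hget0 : (hlprv (needed+1) ps.length t).getD 0 0 = t := by
        unfold hlprv
        rw [PySem.List.getD_map_range _ ps.length 0 0 (by omega)]
        simp
      rw [hget0]
      rw [inner_fold ps (needed+1) t hb ht ps.length rfl hn1]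
      rw [ih (t+1) _ (by omega) (by omega) (by push_cast at hfuel ⊢; omega)]
      rw [PySem.List.pyRange_one_cons
        (show t+1 < needed * (needed+1) ^ (ps.length-1) + 1 by omega)]
      simp

theorem A_eq_listing (ps : List Int) (f m nd : Int)
    (hmin : PySem.List.min? ps (fun x => x) = some m)
    (hnd : PySem.Int.floordiv f m = nd) (hneed : 0 ≤ nd) :
    try_it_all f ps
      = PySem.Set.ofList (((PySem.List.pyRange 1 (nd * (nd + 1) ^ (ps.length - 1) + 1) 1).filter
          (fun u => decide (dotp (digv (nd + 1) ps.length u) ps = f))).map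
            (digv (nd + 1) ps.length)) := by
  have hne : ps ≠ [] := by
    intro h
    rw [(PySem.List.min?_eq_none_iff ps (fun x => x)).mpr h] at hmin
    simp at hmin
  have hn1 : 1 ≤ ps.length := List.length_pos_of_ne_nil hne
  unfold try_it_all
  rw [hmin]
  simp only
  rw [hnd]
  have hlc := loop_char ps f nd ps.length rfl hn1 hneed
    (nd.toNat * (nd.toNat + 1) ^ (ps.length - 1) + 1) 0 [] le_rfl
    (by positivity)
    (by
      push_cast [Int.toNat_of_nonneg hneed]
      omega)
  rw [digv_zero, hlprv_zero] at hlc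
  rw [hlc]
  rw [PySem.List.foldl_ite_eq_foldl_filter
    (p := fun u => dotp (digv (nd + 1) ps.length u) ps = f)
    (f := fun cs u => PySem.Set.add cs (digv (nd + 1) ps.length u))]
  rw [PySem.Set.ofList_eq_foldl, List.foldl_map]
  simp

theorem A_mem (ps : List Int) (f m : Int) (hps : ∀ s ∈ ps, 0 < s)
    (hmin : ∀ s ∈ ps, m ≤ s) (hm : 0 < m) (hf : 0 < f) (hn1 : 1 ≤ ps.length) (v : List Int) :
    (v ∈ ((PySem.List.pyRange 1 (f / m * (f / m + 1) ^ (ps.length - 1) + 1) 1).filter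
          (fun u => decide (dotp (digv (f / m + 1) ps.length u) ps = f))).map
            (digv (f / m + 1) ps.length))
      ↔ (v.length = ps.length ∧ (∀ x ∈ v, 0 ≤ x) ∧ dotp v ps = f) := by
  have hneed : 0 ≤ f / m := Int.ediv_nonneg hf.le hm.le
  have hb : (0:Int) < f / m + 1 := by omega
  have hpw : (0:Int) < (f / m + 1) ^ (ps.length - 1) := pow_pos hb _
  have hTpow : f / m * (f / m + 1) ^ (ps.length - 1) < (f / m + 1) ^ ps.length := by
    calc f / m * (f / m + 1) ^ (ps.length - 1)
        < (f / m + 1) * (f / m + 1) ^ (ps.length - 1) := by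
          apply mul_lt_mul_of_pos_right (by omega) hpw
      _ = (f / m + 1) ^ (ps.length - 1 + 1) := by rw [pow_succ]; ring
      _ = (f / m + 1) ^ ps.length := by congr 1; omega
  constructor
  · rintro hv
    simp only [List.mem_map, List.mem_filter] at hv
    obtain ⟨u, ⟨hu1, hu2⟩, rfl⟩ := hv
    refine ⟨digv_length _ _ _, digv_entry_nonneg _ _ _ hb, by simpa using hu2⟩
  · rintro ⟨hl, hn, hd⟩
    have hbnd : ∀ (k : Nat) (hk : k < v.length), v[k] ≤ f / m := by
      intro k hk
      have h1 : v[k] * ps[k]'(by omega) ≤ dotp v ps :=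
        single_le_dotp v ps (le_of_eq hl) hn (fun s hs => (hps s hs).le) k hk
      have h2 : v[k] ≤ f / ps[k]'(by omega) := by
        rw [Int.le_ediv_iff_mul_le (hps _ (List.getElem_mem _))]
        omega
      calc v[k] ≤ f / ps[k]'(by omega) := h2
        _ ≤ f / m := ediv_le_ediv_divisor f m _ hf.le hm (hmin _ (List.getElem_mem _))
    have hvb : ∀ x ∈ v, 0 ≤ x ∧ x < f / m + 1 := by
      intro x hx
      obtain ⟨k, hk, rfl⟩ := List.mem_iff_getElem.mp hx
      exact ⟨hn _ hx, by have := hbnd k hk; omega⟩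
    have hdig : digv (f / m + 1) ps.length (valb (f / m + 1) v) = v := by
      rw [← hl]
      exact digv_valb _ hb v hvb
    have hu0 : 0 ≤ valb (f / m + 1) v := valb_nonneg _ v hn hb.le
    have hu1 : 1 ≤ valb (f / m + 1) v := by
      rcases eq_or_lt_of_le hu0 with h | h
      · exfalso
        have hz := valb_eq_zero _ v hb hn h.symm
        have : dotp v ps = 0 := dotp_zero_of v ps hz
        omega
      · omega
    have hvne : v ≠ [] := by
      intro h; subst h; simp at hl; omega
    obtain ⟨w, d, rfl⟩ : ∃ w d, v = w ++ [d] :=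
      ⟨v.dropLast, v.getLast hvne, (List.dropLast_append_getLast hvne).symm⟩
    have hwl : w.length = ps.length - 1 := by
      simp at hl; omega
    have hval : valb (f / m + 1) (w ++ [d]) = valb (f / m + 1) w + d * (f / m + 1) ^ (ps.length - 1) := by
      rw [valb_snoc, hwl]
    have hwb : ∀ x ∈ w, 0 ≤ x ∧ x < f / m + 1 := fun x hx => hvb x (by simp [hx])
    have hwlt : valb (f / m + 1) w < (f / m + 1) ^ (ps.length - 1) := by
      have := valb_lt_pow _ w hb hwb
      rwa [hwl] at this
    have hw0 : 0 ≤ valb (f / m + 1) w := valb_nonneg _ w (fun x hx => (hwb x hx).1) hb.le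
    have hdle : d ≤ f / m := by
      have h := hbnd w.length (by simp only [List.length_append, List.length_cons, List.length_nil]; omega)
      simpa using h
    have hd0 : 0 ≤ d := hn d (by simp)
    have huT : valb (f / m + 1) (w ++ [d]) ≤ f / m * (f / m + 1) ^ (ps.length - 1) := by
      rcases eq_or_lt_of_le hdle with hde | hdlt
      · -- d = needed: the lower digits must all vanish
        have hwz : ∀ x ∈ w, x = 0 := by
          by_contra hcon
          push Not at hcon
          obtain ⟨x, hxw, hxne⟩ := hcon
          obtain ⟨k, hkw, rfl⟩ := List.mem_iff_getElem.mp hxw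
          have hx1 : 1 ≤ w[k] := by
            have := (hwb _ hxw).1
            omega
          have hkps : k < ps.length := by omega
          have hterm : w[k] * ps[k] ≤ dotp w ps :=
            single_le_dotp w ps (by omega) (fun x hx => (hwb x hx).1)
              (fun s hs => (hps s hs).le) k hkw
          have hm_le : m ≤ ps[k] := hmin _ (List.getElem_mem hkps)
          have hps_le : ps[k] ≤ w[k] * ps[k] :=
            le_mul_of_one_le_left (by have := hps _ (List.getElem_mem hkps); omega) hx1
          have hlast : ps.length - 1 < ps.length := by omega
          have hsnoc : dotp (w ++ [d]) ps = dotp w ps + d * ps[ps.length - 1] :=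
            dotp_snoc_getD w ps d (ps.length - 1) hwl hlast
          have hmlast : m ≤ ps[ps.length - 1] := hmin _ (List.getElem_mem hlast)
          have hdp : f / m * m ≤ d * ps[ps.length - 1] := by
            rw [← hde]
            exact mul_le_mul_of_nonneg_left hmlast hd0
          have hfm : f < (f / m + 1) * m := by
            have h1 := Int.emod_nonneg f (by omega : m ≠ 0)
            have h2 := Int.emod_lt_of_pos f hm
            have h3 := Int.mul_ediv_add_emod f m
            nlinarith
          nlinarith
        have : valb (f / m + 1) w = 0 := valb_zero_of _ w hwz
        rw [hval, this, ← hde]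
        linarith
      · -- d < needed
        rw [hval]
        nlinarith
    refine List.mem_map.mpr ⟨valb (f / m + 1) (w ++ [d]), List.mem_filter.mpr ⟨?_, ?_⟩, hdig⟩
    · rw [PySem.List.mem_pyRange_one]
      omega
    · simp only [decide_eq_true_eq]
      rw [hdig, hd]

theorem A_pairwise (ps : List Int) (f m : Int) (hm : 0 < m) (hf : 0 ≤ f) (hn1 : 1 ≤ ps.length) :
    (((PySem.List.pyRange 1 (f / m * (f / m + 1) ^ (ps.length - 1) + 1) 1).filter
          (fun u => decide (dotp (digv (f / m + 1) ps.length u) ps = f))).map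
            (digv (f / m + 1) ps.length)).Pairwise
      (fun v w => valb (f / m + 1) v < valb (f / m + 1) w) := by
  have hb : (0:Int) < f / m + 1 := by
    have := Int.ediv_nonneg hf hm.le
    omega
  have hpw : (0:Int) < (f / m + 1) ^ (ps.length - 1) := pow_pos hb _
  have hTpow : f / m * (f / m + 1) ^ (ps.length - 1) < (f / m + 1) ^ ps.length := by
    calc f / m * (f / m + 1) ^ (ps.length - 1)
        < (f / m + 1) * (f / m + 1) ^ (ps.length - 1) := by
          apply mul_lt_mul_of_pos_right (by omega) hpw
      _ = (f / m + 1) ^ (ps.length - 1 + 1) := by rw [pow_succ]; ring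
      _ = (f / m + 1) ^ ps.length := by congr 1; omega
  rw [List.pairwise_map]
  have hpr : (PySem.List.pyRange 1 (f / m * (f / m + 1) ^ (ps.length - 1) + 1) 1).Pairwise (· < ·) :=
    PySem.List.pairwise_lt_pyRange_one _ _
  have hflt := hpr.filter (fun u => decide (dotp (digv (f / m + 1) ps.length u) ps = f))
  apply hflt.imp_of_mem
  intro u1 u2 hu1 hu2 hlt
  have hm1 := (PySem.List.mem_pyRange_one).mp (List.mem_of_mem_filter hu1)
  have hm2 := (PySem.List.mem_pyRange_one).mp (List.mem_of_mem_filter hu2)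
  rw [valb_digv _ hb ps.length u1 (by omega) (by omega),
    valb_digv _ hb ps.length u2 (by omega) (by omega)]
  exact hlt

-- ===== port B characterized =====
theorem altRec_char (ps : List Int) (hps : ∀ s ∈ ps, 0 < s) :
    ∀ (j : Nat), j ≤ ps.length → ∀ (r : Int) (counts : List Int) (results : List (List Int)),
      counts.length = ps.length → counts.take j = List.replicate j 0 →
      altRec ps j r counts results
        = (List.replicate j 0 ++ counts.drop j,
           results ++ (emit ps j r).map (fun v => v ++ counts.drop j)) := by
  intro j
  induction j with
  | zero =>
    intro hj r counts results hlen htake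
    by_cases hr : r = 0 <;> simp [altRec, emit, hr]
  | succ j ih =>
    intro hj r counts results hlen htake
    have hjlen : j < ps.length := by omega
    have hsval : ps.getD j 0 = ps[j] := List.getD_eq_getElem ps 0 hjlen
    have hs : 0 < ps[j] := hps _ (List.getElem_mem hjlen)
    have hcounts : counts = List.replicate (j+1) 0 ++ counts.drop (j+1) := by
      conv_lhs => rw [← List.take_append_drop (j+1) counts]
      rw [htake]
    have hform : counts = List.replicate j 0 ++ (0 : Int) :: counts.drop (j+1) := by
      conv_lhs => rw [hcounts]
      simp [List.replicate_succ']
    have hlen' : ∀ x : Int, (List.replicate j 0 ++ x :: counts.drop (j+1)).length = ps.length := by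
      intro x
      have h1 : counts.length = ps.length := hlen
      have h2 := congrArg List.length hform
      simp only [List.length_append, List.length_replicate, List.length_cons] at h2 ⊢
      omega
    have htakej : ∀ x : Int, (List.replicate j (0:Int) ++ x :: counts.drop (j+1)).take j
        = List.replicate j 0 := by
      intro x
      rw [List.take_append]
      simp
    have hdropj : ∀ x : Int, (List.replicate j (0:Int) ++ x :: counts.drop (j+1)).drop j
        = x :: counts.drop (j+1) := by
      intro x
      rw [List.drop_append]
      simp
    have aux : ∀ (cs : List Int) (x : Int) (res : List (List Int)),
        ∃ y, cs.foldl (fun st c => altRec ps j (r - c * ps.getD j 0) (st.1.set j c) st.2)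
            (List.replicate j 0 ++ x :: counts.drop (j+1), res)
          = (List.replicate j 0 ++ y :: counts.drop (j+1),
             res ++ cs.flatMap (fun c => (emit ps j (r - c * ps.getD j 0)).map
               (fun v => v ++ (c :: counts.drop (j+1))))) := by
      intro cs
      induction cs with
      | nil =>
        intro x res
        exact ⟨x, by simp⟩
      | cons c cs ihc =>
        intro x res
        simp only [List.foldl_cons]
        rw [set_replicate_append j x c _]
        rw [ih (by omega) (r - c * ps.getD j 0) _ res (hlen' c) (htakej c)]
        rw [hdropj c]
        obtain ⟨y, hy⟩ := ihc c (res ++ (emit ps j (r - c * ps.getD j 0)).map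
          (fun v => v ++ (c :: counts.drop (j+1))))
        refine ⟨y, ?_⟩
        rw [hy]
        simp [List.flatMap_cons]
    simp only [altRec]
    obtain ⟨y, hy⟩ := aux (PySem.List.pyRange 0 (PySem.Int.floordiv r (ps.getD j 0) + 1) 1)
      0 results
    conv_lhs => rw [hform]
    rw [hy]
    simp only [set_replicate_append]
    refine Prod.ext ?_ ?_
    · rw [List.replicate_succ']
      simp
    · simp only [emit]
      rw [hsval, PySem.Int.floordiv_eq_ediv_of_pos hs, ← hsval]
      rw [List.map_flatMap]
      congr 1
      congr 1
      funext c
      rw [List.map_map]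
      apply List.map_congr_left
      intro v _
      simp

theorem B_eq_emit (ps : List Int) (f : Int) (hps : ∀ s ∈ ps, 0 < s) :
    try_it_all_alt f ps = PySem.Set.ofList (emit ps ps.length f) := by
  unfold try_it_all_alt
  rw [altRec_char ps hps ps.length le_rfl f (List.replicate ps.length 0) []
    (by simp) (by simp)]
  simp

-- floor division of a positive number by a negative one is negative
theorem floordiv_neg_of_pos_of_neg (f m : Int) (hf : 0 < f) (hm : m < 0) :
    PySem.Int.floordiv f m ≤ -1 := by
  have h1 := PySem.Int.floordiv_mul_add_mod f m
  have h2 := PySem.Int.mod_neg_bounds f (b := m) hm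
  nlinarith [h1, h2.1, h2.2]

-- A returns the empty set as soon as needed = final_score // min is not positive
theorem A_empty_of_nonpos (ps : List Int) (f m : Int)
    (hmin : PySem.List.min? ps (fun x => x) = some m)
    (hneed : PySem.Int.floordiv f m ≤ 0) :
    try_it_all f ps = [] := by
  unfold try_it_all
  rw [hmin]
  simp only
  have htn : (PySem.Int.floordiv f m).toNat = 0 := by omega
  rw [htn]
  have hfuel : (0 * (0 + 1) ^ (ps.length - 1) + 1 : Nat) = 1 := by norm_num
  rw [hfuel]
  simp only [tryWhile]
  have hget : (List.replicate ps.length (0:Int)).getD (ps.length - 1) 0 = 0 := by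
    rcases Nat.eq_zero_or_pos ps.length with h | h
    · simp [h]
    · rw [List.getD_eq_getElem _ _ (by simp; omega)]
      simp
  rw [hget, if_neg (by omega)]
theorem eq_of_mem_iff_pairwise (key : List Int → Int) (l₁ l₂ : List (List Int))
    (h₁ : l₁.Pairwise (fun v w => key v < key w)) (h₂ : l₂.Pairwise (fun v w => key v < key w))
    (hmem : ∀ v, v ∈ l₁ ↔ v ∈ l₂) : l₁ = l₂ := by
  have n1 : l₁.Nodup := h₁.imp (fun h he => by subst he; exact lt_irrefl _ h)
  have n2 : l₂.Nodup := h₂.imp (fun h he => by subst he; exact lt_irrefl _ h)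
  have hperm : l₁.Perm l₂ := (List.perm_ext_iff_of_nodup n1 n2).mpr hmem
  exact List.Perm.eq_of_pairwise (fun a b _ _ hab hba => absurd hba (by omega)) h₁ h₂ hperm

-- floor-division sign facts used for the non-positive-score clauses
theorem floordiv_zero_of_between (f s : Int) (hs : s < 0) (hsf : s < f) (hf : f < 0) :
    PySem.Int.floordiv f s = 0 := by
  have h1 := PySem.Int.floordiv_mul_add_mod f s
  have h2 := PySem.Int.mod_neg_bounds f (b := s) hs
  rcases lt_trichotomy (PySem.Int.floordiv f s) 0 with h | h | h
  · nlinarith [h1, h2.1, h2.2]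
  · exact h
  · nlinarith [h1, h2.1, h2.2]

theorem floordiv_zero_left (s : Int) (hs : s ≠ 0) : PySem.Int.floordiv 0 s = 0 := by
  rcases lt_or_gt_of_ne hs with h | h
  · have h1 := PySem.Int.floordiv_mul_add_mod 0 s
    have h2 := PySem.Int.mod_neg_bounds 0 (b := s) h
    rcases lt_trichotomy (PySem.Int.floordiv 0 s) 0 with h3 | h3 | h3
    · nlinarith [h1, h2.1, h2.2]
    · exact h3
    · nlinarith [h1, h2.1, h2.2]
  · rw [PySem.Int.floordiv_eq_ediv_of_pos h, Int.zero_ediv]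

theorem floordiv_nonneg_of_neg_neg (f s : Int) (hf : f < 0) (hs : s < 0) :
    0 ≤ PySem.Int.floordiv f s := by
  have h1 := PySem.Int.floordiv_mul_add_mod f s
  have h2 := PySem.Int.mod_neg_bounds f (b := s) hs
  by_contra h
  push Not at h
  nlinarith [h1, h2.1, h2.2]

-- B returns no combination when some score is negative and every score after it
-- exceeds the (positive) target: the backtracking dies before reaching index i
theorem B_empty_g (ps : List Int) (f : Int) (hf : 0 < f) (i : Nat) (hi : i < ps.length)
    (hneg : ps.getD i 0 < 0)
    (hsuf : ∀ k, k < ps.length → i < k → f < ps.getD k 0) :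
    try_it_all_alt f ps = [] := by
  have main : ∀ d j, j = i + 1 + d → j ≤ ps.length → ∀ counts results,
      ∃ c', altRec ps j f counts results = (c', results) := by
    intro d
    induction d with
    | zero =>
      intro j hj hjle counts results
      subst hj
      simp only [Nat.add_zero, altRec]
      have hdiv : PySem.Int.floordiv f (ps.getD i 0) + 1 ≤ 0 := by
        have := floordiv_neg_of_pos_of_neg f _ hf hneg
        omega
      rw [PySem.List.pyRange_one_eq_nil hdiv]
      exact ⟨_, rfl⟩
    | succ d ihd =>
      intro j hj hjle counts results
      subst hj
      have hk : i + 1 + d < ps.length := by omega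
      have hs : f < ps.getD (i+1+d) 0 := hsuf _ hk (by omega)
      show ∃ c', altRec ps ((i+1+d)+1) f counts results = _
      simp only [altRec]
      have hdiv : PySem.Int.floordiv f (ps.getD (i+1+d) 0) = 0 := by
        rw [PySem.Int.floordiv_eq_ediv_of_pos (by omega)]
        exact Int.ediv_eq_zero_of_lt hf.le hs
      rw [hdiv, PySem.List.pyRange_one_singleton]
      simp only [List.foldl_cons, List.foldl_nil]
      obtain ⟨c', hc'⟩ := ihd (i+1+d) rfl (by omega) (counts.set (i+1+d) 0) results
      rw [show f - 0 * ps.getD (i+1+d) 0 = f by ring, hc']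
      exact ⟨_, rfl⟩
  obtain ⟨k, hk⟩ : ∃ k, ps.length = i + 1 + k := ⟨ps.length - i - 1, by omega⟩
  unfold try_it_all_alt
  obtain ⟨c', hc'⟩ := main k ps.length hk le_rfl (List.replicate ps.length 0) []
  rw [hc']
  rfl

-- mirrored: a positive score at i, negative scores milder than the (negative) target after it
theorem B_empty_h (ps : List Int) (f : Int) (hf : f < 0)
    (hall : ∀ s ∈ ps, s < 0 → f > s) (i : Nat) (hi : i < ps.length)
    (hpos : 0 < ps.getD i 0)
    (hsuf : ∀ k, k < ps.length → i < k → ps.getD k 0 < 0) :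
    try_it_all_alt f ps = [] := by
  have main : ∀ d j, j = i + 1 + d → j ≤ ps.length → ∀ counts results,
      ∃ c', altRec ps j f counts results = (c', results) := by
    intro d
    induction d with
    | zero =>
      intro j hj hjle counts results
      subst hj
      simp only [Nat.add_zero, altRec]
      have hdiv : PySem.Int.floordiv f (ps.getD i 0) + 1 ≤ 0 := by
        rw [PySem.Int.floordiv_eq_ediv_of_pos hpos]
        have := Int.ediv_neg_of_neg_of_pos hf hpos
        omega
      rw [PySem.List.pyRange_one_eq_nil hdiv]
      exact ⟨_, rfl⟩
    | succ d ihd =>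
      intro j hj hjle counts results
      subst hj
      have hk : i + 1 + d < ps.length := by omega
      have hs : ps.getD (i+1+d) 0 < 0 := hsuf _ hk (by omega)
      have hmem : ps.getD (i+1+d) 0 ∈ ps := by
        rw [List.getD_eq_getElem ps 0 hk]
        exact List.getElem_mem hk
      have hfs : f > ps.getD (i+1+d) 0 := hall _ hmem hs
      show ∃ c', altRec ps ((i+1+d)+1) f counts results = _
      simp only [altRec]
      rw [floordiv_zero_of_between f _ hs hfs hf, PySem.List.pyRange_one_singleton]
      simp only [List.foldl_cons, List.foldl_nil]
      obtain ⟨c', hc'⟩ := ihd (i+1+d) rfl (by omega) (counts.set (i+1+d) 0) results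
      rw [show f - 0 * ps.getD (i+1+d) 0 = f by ring, hc']
      exact ⟨_, rfl⟩
  obtain ⟨k, hk⟩ : ∃ k, ps.length = i + 1 + k := ⟨ps.length - i - 1, by omega⟩
  unfold try_it_all_alt
  obtain ⟨c', hc'⟩ := main k ps.length hk le_rfl (List.replicate ps.length 0) []
  rw [hc']
  rfl

-- with a zero target and zero-free scores, B returns exactly the all-zero count vector
theorem B_zero (ps : List Int) (h0 : (0:Int) ∉ ps) :
    try_it_all_alt 0 ps = [List.replicate ps.length 0] := by
  have main : ∀ j, j ≤ ps.length → ∀ (counts : List Int) results,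
      counts.take j = List.replicate j 0 →
      altRec ps j 0 counts results = (counts, results ++ [counts]) := by
    intro j
    induction j with
    | zero =>
      intro _ counts results _
      simp [altRec]
    | succ j ih =>
      intro hj counts results htake
      have hjlen : j < ps.length := by omega
      have hsne : ps.getD j 0 ≠ 0 := by
        rw [List.getD_eq_getElem ps 0 hjlen]
        intro h
        exact h0 (h ▸ List.getElem_mem hjlen)
      have hform : counts = List.replicate j 0 ++ (0 : Int) :: counts.drop (j+1) := by
        conv_lhs => rw [← List.take_append_drop (j+1) counts, htake]
        simp [List.replicate_succ']
      simp only [altRec]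
      rw [floordiv_zero_left _ hsne, PySem.List.pyRange_one_singleton]
      simp only [List.foldl_cons, List.foldl_nil]
      have hset : counts.set j 0 = counts := by
        conv_lhs => rw [hform]
        rw [set_replicate_append]
        exact hform.symm
      rw [show (0:Int) - 0 * ps.getD j 0 = 0 by ring, hset,
        ih (by omega) counts results (by
          conv_lhs => rw [hform]
          rw [List.take_append]
          simp)]
      rw [hset]
  unfold try_it_all_alt
  rw [main ps.length le_rfl (List.replicate ps.length 0) [] (by simp)]
  rfl

-- on a single score B is one filtered range
theorem B_singleton (s f : Int) :
    try_it_all_alt f [s]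
      = PySem.Set.ofList (((PySem.List.pyRange 0 (PySem.Int.floordiv f s + 1) 1).filter
          (fun c => decide (c * s = f))).map (fun c => [c])) := by
  unfold try_it_all_alt
  have aux : ∀ (cs : List Int) (x : Int) (res : List (List Int)),
      ∃ y, cs.foldl (fun (st : List Int × List (List Int)) c =>
            (st.1.set 0 c, if f - c * s = 0 then st.2 ++ [st.1.set 0 c] else st.2)) ([x], res)
        = ([y], res ++ (cs.filter (fun c => decide (c * s = f))).map (fun c => [c])) := by
    intro cs
    induction cs with
    | nil => intro x res; exact ⟨x, by simp⟩
    | cons c cs ihc =>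
      intro x res
      simp only [List.foldl_cons, List.set_cons_zero]
      by_cases h : c * s = f
      · rw [if_pos (by omega)]
        obtain ⟨y, hy⟩ := ihc c (res ++ [[c]])
        refine ⟨y, ?_⟩
        rw [hy, List.filter_cons_of_pos (by simpa using h)]
        simp
      · rw [if_neg (by omega)]
        obtain ⟨y, hy⟩ := ihc c res
        refine ⟨y, ?_⟩
        rw [hy, List.filter_cons_of_neg (by simpa using h)]
  show PySem.Set.ofList (altRec [s] 1 f [0] []).2 = _
  simp only [altRec, List.getD_cons_zero]
  obtain ⟨y, hy⟩ := aux (PySem.List.pyRange 0 (PySem.Int.floordiv f s + 1) 1) 0 []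
  rw [hy]
  simp

-- the agreed value on all-positive score lists with a non-zero target
theorem AB_equal_pos (ps : List Int) (f : Int) (hne : ps ≠ [])
    (hpos : ∀ s ∈ ps, 0 < s) (hf0 : f ≠ 0) :
    try_it_all f ps = try_it_all_alt f ps := by
  cases h : PySem.List.min? ps (fun x => x) with
  | none => exact absurd ((PySem.List.min?_eq_none_iff ps _).mp h) hne
  | some m =>
    have hm : 0 < m := hpos m (PySem.List.min?_mem h)
    have hminle : ∀ s ∈ ps, m ≤ s := PySem.List.min?_isMin h
    have hn1 : 1 ≤ ps.length := List.length_pos_of_ne_nil hne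
    rcases lt_trichotomy f 0 with hf | hf | hf
    · have hneed : f / m < 0 := Int.ediv_neg_of_neg_of_pos hf hm
      rw [A_empty_of_nonpos ps f m h
          (by rw [PySem.Int.floordiv_eq_ediv_of_pos hm]; exact hneed.le),
        B_eq_emit ps f hpos, emit_neg ps hpos ps.length le_rfl f hf]
      rfl
    · exact absurd hf hf0
    · have hneed : 0 ≤ f / m := Int.ediv_nonneg hf.le hm.le
      rw [A_eq_listing ps f m (f / m) h (PySem.Int.floordiv_eq_ediv_of_pos hm) hneed,
        B_eq_emit ps f hpos]
      congr 1
      exact eq_of_mem_iff_pairwise (valb (f / m + 1)) _ _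
        (A_pairwise ps f m hm hf.le hn1)
        ((emit_good ps m f hpos hminle hm hf.le ps.length le_rfl f le_rfl).2)
        (fun v => by
          rw [A_mem ps f m hpos hminle hm hf hn1 v,
            emit_mem ps hpos ps.length le_rfl f v])

-- the agreed value on a single negative score with a negative target
theorem AB_equal_one_neg (s f : Int) (hs : s < 0) (hf : f < 0) :
    try_it_all f [s] = try_it_all_alt f [s] := by
  have hmin : PySem.List.min? [s] (fun x => x) = some s := rfl
  have hnd : 0 ≤ PySem.Int.floordiv f s := floordiv_nonneg_of_neg_neg f s hf hs
  have hb : 0 < PySem.Int.floordiv f s + 1 := by omega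
  have hsimp : ∀ u : Int, 0 ≤ u → u ≤ PySem.Int.floordiv f s →
      digv (PySem.Int.floordiv f s + 1) 1 u = [u] := by
    intro u h1 h2
    simp only [digv, List.range_one, List.map_cons, List.map_nil, pow_zero, Int.ediv_one]
    rw [Int.emod_eq_of_lt h1 (by omega)]
  rw [A_eq_listing [s] f s (PySem.Int.floordiv f s) hmin rfl hnd, B_singleton s f]
  simp only [List.length_cons, List.length_nil, Nat.sub_self, pow_zero, mul_one, Nat.zero_add,
    zero_add]
  congr 1
  rw [PySem.List.pyRange_one_cons hb, List.filter_cons_of_neg (by simp; omega)]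
  simp only [zero_add]
  have e1 : List.filter (fun u => decide (dotp (digv (PySem.Int.floordiv f s + 1) 1 u) [s] = f))
        (PySem.List.pyRange 1 (PySem.Int.floordiv f s + 1) 1)
      = List.filter (fun u => decide (u * s = f))
        (PySem.List.pyRange 1 (PySem.Int.floordiv f s + 1) 1) := by
    apply List.filter_congr
    intro u hu
    obtain ⟨h1, h2⟩ := PySem.List.mem_pyRange_one.mp hu
    simp [hsimp u (by omega) (by omega), dotp]
  rw [e1]
  apply List.map_congr_left
  intro u hu
  have hur := List.mem_of_mem_filter hu
  obtain ⟨h1, h2⟩ := PySem.List.mem_pyRange_one.mp hur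
  exact hsimp u (by omega) (by omega)

theorem try_it_all_spec : Claim_unchanged_try_it_all := by
  intro f ps hdom hpre hD
  unfold Pre_try_it_all at hpre
  obtain ⟨hne, hclause⟩ := hpre
  have hf0 : f ≠ 0 := hD
  show try_it_all f ps = try_it_all_alt f ps
  have hn1 : 1 ≤ ps.length := List.length_pos_of_ne_nil hne
  rcases hclause with hpos | ⟨hlen1, hs0⟩ | ⟨hzero, -⟩ | ⟨hf, i, hi, hneg, hsuf⟩ | hcl5
  · -- all scores positive
    exact AB_equal_pos ps f hne hpos hf0
  · -- a single score
    obtain ⟨s, rfl⟩ := List.length_eq_one_iff.mp hlen1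
    have hs : ([s] : List Int).getD 0 0 = s := rfl
    rw [hs] at hs0
    rcases lt_trichotomy s 0 with hsneg | h | hspos
    · rcases lt_trichotomy f 0 with hfneg | h | hfpos
      · exact AB_equal_one_neg s f hsneg hfneg
      · exact absurd h hf0
      · -- positive target, negative score: both empty
        rw [A_empty_of_nonpos [s] f s rfl
            (by have := floordiv_neg_of_pos_of_neg f s hfpos hsneg; omega),
          B_empty_g [s] f hfpos 0 (by simp) (by simpa using hsneg) (by omega)]
    · exact absurd h hs0
    · exact AB_equal_pos [s] f (by simp) (by simpa using hspos) hf0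
  · exact absurd hzero hf0
  · -- clause 4: negative score at i, every later score above the positive target
    have hmem : ps.getD i 0 ∈ ps := by
      rw [List.getD_eq_getElem ps 0 hi]
      exact List.getElem_mem hi
    cases h : PySem.List.min? ps (fun x => x) with
    | none => exact absurd ((PySem.List.min?_eq_none_iff ps _).mp h) hne
    | some m =>
      have hm : m < 0 := by
        have := PySem.List.min?_isMin h _ hmem
        simp only at this
        omega
      rw [A_empty_of_nonpos ps f m h
          (by have := floordiv_neg_of_pos_of_neg f m hf hm; omega),
        B_empty_g ps f hf i hi hneg (fun k hk hik => hsuf k hk hik)]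
  · -- clause 5: positive score at i, milder negative scores after it, negative target
    obtain ⟨hf, h0, hall, i, hi, hposi, hsuf⟩ := hcl5
    cases h : PySem.List.min? ps (fun x => x) with
    | none => exact absurd ((PySem.List.min?_eq_none_iff ps _).mp h) hne
    | some m =>
      have hmmem : m ∈ ps := PySem.List.min?_mem h
      have hm0 : m ≠ 0 := by
        intro hm
        exact h0 (hm ▸ hmmem)
      have hAempty : PySem.Int.floordiv f m ≤ 0 := by
        rcases lt_or_gt_of_ne hm0 with hmneg | hmpos
        · rw [floordiv_zero_of_between f m hmneg (hall m hmmem hmneg) hf]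
        · rw [PySem.Int.floordiv_eq_ediv_of_pos hmpos]
          exact (Int.ediv_neg_of_neg_of_pos hf hmpos).le
      rw [A_empty_of_nonpos ps f m h hAempty,
        B_empty_h ps f hf hall i hi hposi (fun k hk hik => hsuf k hk hik)]

theorem try_it_all_changed : Claim_changed_try_it_all := by
  unfold Claim_changed_try_it_all; decide

theorem try_it_all_tight : Claim_exact_try_it_all := by
  intro f ps hdom hpre hD
  unfold Pre_try_it_all at hpre
  obtain ⟨hne, hclause⟩ := hpre
  have hf0 : f = 0 := hD
  subst hf0
  have h0 : (0:Int) ∉ ps := by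
    rcases hclause with hpos | ⟨hlen1, hs0⟩ | ⟨-, h0⟩ | ⟨hf, -⟩ | ⟨hf, -⟩
    · intro hmem
      exact absurd (hpos 0 hmem) (by omega)
    · obtain ⟨s, rfl⟩ := List.length_eq_one_iff.mp hlen1
      have hs : ([s] : List Int).getD 0 0 = s := rfl
      rw [hs] at hs0
      intro hmem
      simp only [List.mem_singleton] at hmem
      exact hs0 hmem.symm
    · exact h0
    · omega
    · omega
  cases h : PySem.List.min? ps (fun x => x) with
  | none => exact absurd ((PySem.List.min?_eq_none_iff ps _).mp h) hne
  | some m =>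
    have hm0 : m ≠ 0 := by
      intro hm
      exact h0 (hm ▸ PySem.List.min?_mem h)
    rw [A_empty_of_nonpos ps 0 m h (by rw [floordiv_zero_left m hm0]),
      B_zero ps h0]
    simp
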